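-- pv_equiv track=rewrite | github.com/dianafeld/headhunter-tasks | entrance-test/02_number_sequence.py | calculate_index
-- ===== SOURCE A (Python) =====
-- ans_start = 0
--
-- def calculate_index(number):
--
--     index = 0
--     powers_10 = 1
--     digits = 1
--     while powers_10 * 10 <= number:
--         index += (9 * powers_10) * digits
--         powers_10 *= 10
--         digits += 1
--
--     index += (number - powers_10) * digits + 1
--
--     return index + ans_start
-- ===== SOURCE B (Python) =====
-- ans_start = 0
--
-- def calculate_index(number):
--     # count digits by shrinking the number itself (no powers_10 accumulator),
--     # then get the index in one closed-form step via the repunit identity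
--     digits = 1
--     n = number
--     while n >= 10:
--         n //= 10
--         digits += 1
--     return number * digits - (10 ** digits - 1) // 9 + 1 + ans_start
-- ===== Notes on version B (the rewrite author's own statement) =====
-- stated objective: alternative
-- what changed: B counts digits by repeatedly floor-dividing the number itself (instead of A's growing powers-of-ten accumulator with incremental index summation) and then computes the index in one closed-form step from the repunit identity.
import Mathlib
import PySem

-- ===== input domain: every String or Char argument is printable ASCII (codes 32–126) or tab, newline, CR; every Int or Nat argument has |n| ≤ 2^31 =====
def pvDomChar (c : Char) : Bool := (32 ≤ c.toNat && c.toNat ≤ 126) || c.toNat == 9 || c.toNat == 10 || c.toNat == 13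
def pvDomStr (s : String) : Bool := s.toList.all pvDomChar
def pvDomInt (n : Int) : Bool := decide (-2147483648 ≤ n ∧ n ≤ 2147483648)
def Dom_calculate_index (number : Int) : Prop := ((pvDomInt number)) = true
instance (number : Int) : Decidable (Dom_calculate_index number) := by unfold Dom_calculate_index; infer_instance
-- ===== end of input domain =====

-- B counts digits by shrinking the number itself and gets the index in one
-- closed-form step (repunit identity), instead of A's powers_10 accumulator
-- with incremental per-decade index summation (objective: alternative).

-- ===== PORT A =====
-- module constant `ans_start = 0`
def pvAnsStart : Int := 0

-- A's while loop: state (index, powers_10, digits)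
def calcLoopA (number index powers_10 digits : Int) (hp : 0 < powers_10) : Int × Int × Int :=
  if h : powers_10 * 10 ≤ number then
    calcLoopA number (index + (9 * powers_10) * digits) (powers_10 * 10) (digits + 1) (by omega)
  else
    (index, powers_10, digits)
termination_by (number - powers_10).toNat
decreasing_by omega

def calculate_index (number : Int) : Int :=
  let s := calcLoopA number 0 1 1 (by norm_num)
  (s.1 + (number - s.2.1) * s.2.2 + 1) + pvAnsStart

-- ===== PORT B =====
-- B's while loop: shrink n by `n //= 10`, counting digits
def calcDigitsB (n digits : Int) : Int :=
  if h : 10 ≤ n then calcDigitsB (PySem.Int.floordiv n 10) (digits + 1) else digits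
termination_by n.toNat
decreasing_by
  have h10 : PySem.Int.floordiv n 10 = n / 10 := PySem.Int.floordiv_eq_ediv_of_pos (by norm_num)
  have h1 : n / 10 < n := (Int.ediv_lt_iff_lt_mul (by norm_num)).mpr (by nlinarith)
  have h2 : 0 ≤ n / 10 := Int.ediv_nonneg (by omega) (by norm_num)
  omega

def calculate_index_alt (number : Int) : Int :=
  let digits := calcDigitsB number 1
  -- `10 ** digits`: digits ≥ 1 always, so the Nat exponent is exact
  number * digits - PySem.Int.floordiv ((10 : Int) ^ digits.toNat - 1) 9 + 1 + pvAnsStart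

-- ===== PRECONDITION & SPEC =====
def Spec_calculate_index (number : Int) (out : Int) : Prop := out = calculate_index_alt number
instance (number : Int) (out : Int) : Decidable (Spec_calculate_index number out) := by unfold Spec_calculate_index; infer_instance

-- ===== CLAIM (what is proved, stated in full; the proofs are below) =====
def Claim_equal_calculate_index : Prop := ∀ (number : Int), Dom_calculate_index number → Spec_calculate_index number (calculate_index number)

-- ===== LEMMAS AND PROOFS =====

-- invariant of A's loop: 9*index - 9*p*d + 10*p is conserved, p stays positive,
-- and (d, p) advance in lock step: d' = d + k, p' = p * 10^k for some k.
theorem calcLoopA_inv (number i p d : Int) (hp : 0 < p) :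
    (9 * (calcLoopA number i p d hp).1
      - 9 * (calcLoopA number i p d hp).2.1 * (calcLoopA number i p d hp).2.2
      + 10 * (calcLoopA number i p d hp).2.1
      = 9 * i - 9 * p * d + 10 * p) ∧
    0 < (calcLoopA number i p d hp).2.1 ∧
    ∃ k : ℕ, (calcLoopA number i p d hp).2.2 = d + k ∧
      (calcLoopA number i p d hp).2.1 = p * 10 ^ k := by
  fun_induction calcLoopA number i p d hp with
  | case1 i p d hp h ih =>
      obtain ⟨h1, h2, k, hk1, hk2⟩ := ih
      refine ⟨by linarith [h1], h2, k + 1, by push_cast; omega, ?_⟩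
      rw [hk2]; ring
  | case2 i p d hp h =>
      exact ⟨by ring, hp, 0, by simp, by simp⟩

-- B's digit loop agrees with A's loop digits: comparing n = number / p at each stage
theorem calcDigitsB_eq (number i p d : Int) (hp : 0 < p) :
    calcDigitsB (number / p) d = (calcLoopA number i p d hp).2.2 := by
  fun_induction calcLoopA number i p d hp with
  | case1 i p d hp h ih =>
      rw [calcDigitsB]
      have hcond : 10 ≤ number / p := Int.le_ediv_iff_mul_le hp |>.mpr (by linarith)
      rw [dif_pos hcond]
      have hfd : PySem.Int.floordiv (number / p) 10 = number / p / 10 :=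
        PySem.Int.floordiv_eq_ediv_of_pos (by norm_num)
      have hdd : number / p / 10 = number / (p * 10) := Int.ediv_ediv_of_nonneg (le_of_lt hp)
      rw [hfd, hdd]
      exact ih
  | case2 i p d hp h =>
      rw [calcDigitsB]
      have hcond : ¬ (10 ≤ number / p) := by
        intro hc
        have := Int.le_ediv_iff_mul_le hp |>.mp hc
        omega
      rw [dif_neg hcond]

theorem calculate_index_eq (number : Int) :
    calculate_index number = calculate_index_alt number := by
  obtain ⟨h1, h2, k, hk1, hk2⟩ := calcLoopA_inv number 0 1 1 (by norm_num)
  unfold calculate_index calculate_index_alt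
  set s := calcLoopA number 0 1 1 (by norm_num) with hs
  have hd : calcDigitsB number 1 = s.2.2 := by
    have := calcDigitsB_eq number 0 1 1 (by norm_num)
    simpa using this
  simp only [hd]
  have hdn : s.2.2.toNat = k + 1 := by omega
  have hpow : (10 : Int) ^ s.2.2.toNat = 10 * s.2.1 := by
    rw [hdn, hk2]; ring
  simp only [hpow]
  have h9 : (9 : Int) ∣ 10 * s.2.1 - 1 := by
    have hmod : ∀ m : ℕ, (10 : Int) ^ m % 9 = 1 := by
      intro m
      induction m with
      | zero => rfl
      | succ m ih => rw [pow_succ, Int.mul_emod, ih]; rfl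
    have : s.2.1 % 9 = 1 := by rw [hk2, one_mul]; exact hmod k
    omega
  obtain ⟨c, hc⟩ := h9
  have hfd : PySem.Int.floordiv (10 * s.2.1 - 1) 9 = c := by
    rw [hc, PySem.Int.floordiv_eq_ediv_of_pos (by norm_num)]
    exact Int.mul_ediv_cancel_left c (by norm_num)
  simp only [hfd]
  nlinarith [h1, hc]

-- ===== VERDICT (by name: the statement is the Claim_ definition above) =====
theorem calculate_index_spec : Claim_equal_calculate_index := by
  intro number _
  unfold Spec_calculate_index
  exact calculate_index_eq number
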